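-- pv_equiv track=rewrite | github.com/Codes24/Common | projecteuler/problem41.py | not_zero
-- ===== SOURCE A (Python) =====
-- def not_zero(number):
-- 	digits = []
-- 	while number//10 != 0:
-- 		digits.append(number%10)
-- 		number = number // 10
-- 	digits.append(number)
-- 	for digit in digits:
-- 		if digit == 0:
-- 			return 0
-- 	return 1
-- ===== SOURCE B (Python) =====
-- def not_zero(number):
--     return 0 if '0' in str(number) else 1
-- ===== Notes on version B (the rewrite author's own statement) =====
-- stated objective: idiomatic
-- what changed: Replaces the floor-division/modulo digit-extraction while-loop plus list scan with a single membership test for the zero character in the decimal string representation.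
import Mathlib
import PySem

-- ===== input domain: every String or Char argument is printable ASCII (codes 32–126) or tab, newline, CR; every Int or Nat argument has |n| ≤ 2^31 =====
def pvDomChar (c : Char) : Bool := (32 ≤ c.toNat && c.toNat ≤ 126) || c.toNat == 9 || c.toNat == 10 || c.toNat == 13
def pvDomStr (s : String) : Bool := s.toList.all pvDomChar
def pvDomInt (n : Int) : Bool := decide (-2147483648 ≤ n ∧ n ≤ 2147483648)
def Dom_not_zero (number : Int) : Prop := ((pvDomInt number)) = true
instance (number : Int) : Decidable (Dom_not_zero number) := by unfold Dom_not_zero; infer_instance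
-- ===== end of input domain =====

-- B replaces A's floor-division/modulo digit-extraction loop and list scan by a single
-- test for the zero character in str(number) (idiomatic; same cost). Equivalence is
-- claimed on nonnegative inputs, where A terminates.

-- ===== PORT A =====
-- the while-loop; fuel bounds the iteration count (number.natAbs + 1 suffices on Pre_)
def pvLoopA : Nat → Int → List Int → List Int
  | 0, number, digits => digits ++ [number]
  | fuel+1, number, digits =>
    if PySem.Int.floordiv number 10 ≠ 0 then
      pvLoopA fuel (PySem.Int.floordiv number 10) (digits ++ [PySem.Int.mod number 10])
    else digits ++ [number]

-- the 'for digit in digits: if digit == 0: return 0' scan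
def pvCheckA : List Int → Int
  | [] => 1
  | d :: ds => if d = 0 then 0 else pvCheckA ds

def not_zero (number : Int) : Int :=
  pvCheckA (pvLoopA (number.natAbs + 1) number [])

-- ===== PORT B =====
def not_zero_alt (number : Int) : Int :=
  if PySem.Str.isIn "0" (PySem.Int.toStr number) then 0 else 1

-- ===== PRECONDITION & SPEC =====
-- Pre_ excludes negative numbers: there A's while-loop never terminates (number//10 stays -1).
def Pre_not_zero (number : Int) : Prop := 0 ≤ number
instance (number : Int) : Decidable (Pre_not_zero number) := by unfold Pre_not_zero; infer_instance
def pvWitness_not_zero : Int := (105)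

def Spec_not_zero (number : Int) (out : Int) : Prop := out = not_zero_alt number
instance (number : Int) (out : Int) : Decidable (Spec_not_zero number out) := by unfold Spec_not_zero; infer_instance

-- ===== CLAIM (what is proved, stated in full; the proofs are below) =====
def Claim_equal_not_zero : Prop := ∀ (number : Int), Dom_not_zero number → Pre_not_zero number → Spec_not_zero number (not_zero number)

-- ===== LEMMAS AND PROOFS =====

-- "the decimal representation of m contains the digit 0"
def pvHasZero (m : Nat) : Prop := 0 ∈ Nat.digits 10 m ∨ m = 0

lemma pvCheckA_eq (ds : List Int) : pvCheckA ds = if (0 : Int) ∈ ds then 0 else 1 := by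
  induction ds with
  | nil => simp [pvCheckA]
  | cons d ds ih =>
    by_cases h : d = 0 <;> simp [pvCheckA, h, ih, eq_comm]

lemma pvHasZero_step (m : Nat) (h : 10 ≤ m) :
    pvHasZero m ↔ m % 10 = 0 ∨ pvHasZero (m / 10) := by
  have hm : m ≠ 0 := by omega
  have h10 : m / 10 ≠ 0 := by omega
  rw [pvHasZero, pvHasZero, Nat.digits_def' (by norm_num : 1 < 10) (by omega)]
  simp [hm, h10, eq_comm]

lemma pvCharZero (m : Nat) (hm : m < 10) : pvHasZero m ↔ m = 0 := by
  unfold pvHasZero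
  rcases Nat.eq_zero_or_pos m with h0 | h0
  · simp [h0]
  · rw [Nat.digits_def' (by norm_num : (1:ℕ) < 10) h0]
    simp [Nat.mod_eq_of_lt hm, Nat.div_eq_of_lt hm]
    omega

lemma pvLoopA_mem (m : Nat) : ∀ (fuel : Nat) (acc : List Int), m < fuel →
    ((0 : Int) ∈ pvLoopA fuel (m : Int) acc ↔ 0 ∈ acc ∨ pvHasZero m) := by
  induction m using Nat.strong_induction_on with
  | _ m ih =>
    intro fuel acc hfuel
    match fuel with
    | 0 => omega
    | f + 1 =>
      rw [pvLoopA]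
      have e1 : PySem.Int.floordiv (m : Int) 10 = ((m / 10 : Nat) : Int) := by
        rw [PySem.Int.floordiv_eq_ediv_of_pos (by norm_num)]; omega
      have e2 : PySem.Int.mod (m : Int) 10 = ((m % 10 : Nat) : Int) := by
        rw [PySem.Int.mod_eq_emod_of_pos (by norm_num)]; omega
      rw [e1, e2]
      by_cases h : m / 10 = 0
      · have hm : m < 10 := by omega
        rw [if_neg (by simp [h])]
        simp only [List.mem_append, List.mem_singleton]
        rw [pvCharZero m hm]
        have : ((0 : Int) = (m : Int)) ↔ m = 0 := by omega
        rw [this]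
      · have hcond : ((m / 10 : Nat) : Int) ≠ 0 := by exact_mod_cast h
        rw [if_pos hcond]
        have hlt : m / 10 < m := Nat.div_lt_self (by omega) (by norm_num)
        rw [ih (m / 10) hlt f (acc ++ [((m % 10 : Nat) : Int)]) (by omega)]
        rw [pvHasZero_step m (by omega)]
        simp only [List.mem_append, List.mem_singleton]
        have : ((0 : Int) = ((m % 10 : Nat) : Int)) ↔ m % 10 = 0 := by omega
        rw [this]
        tauto

lemma pvDigitChar_eq_zero (k : Nat) (hk : k < 10) : '0' = Nat.digitChar k ↔ k = 0 := by
  interval_cases k <;> simp [Nat.digitChar]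

lemma pvToDigitsCore_mem (m : Nat) : ∀ (fuel : Nat) (ds : List Char), m < fuel →
    ('0' ∈ Nat.toDigitsCore 10 fuel m ds ↔ pvHasZero m ∨ '0' ∈ ds) := by
  induction m using Nat.strong_induction_on with
  | _ m ih =>
    intro fuel ds hfuel
    match fuel with
    | 0 => omega
    | f + 1 =>
      rw [Nat.toDigitsCore]
      by_cases h : m / 10 = 0
      · have hm : m < 10 := by omega
        rw [if_pos h]
        simp only [List.mem_cons]
        rw [pvDigitChar_eq_zero (m % 10) (Nat.mod_lt m (by norm_num))]
        rw [Nat.mod_eq_of_lt hm, pvCharZero m hm]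
      · rw [if_neg h]
        have hlt : m / 10 < m := Nat.div_lt_self (by omega) (by norm_num)
        rw [ih (m / 10) hlt f (Nat.digitChar (m % 10) :: ds) (by omega)]
        rw [pvHasZero_step m (by omega)]
        simp only [List.mem_cons]
        rw [pvDigitChar_eq_zero (m % 10) (Nat.mod_lt m (by norm_num))]
        tauto

lemma pvToChars_mem (m : Nat) : '0' ∈ PySem.Int.toChars (m : Int) ↔ pvHasZero m := by
  rw [PySem.Int.toChars]
  rw [if_neg (by omega : ¬ ((m : Int) < 0))]
  simp only [Int.toNat_natCast]
  rw [Nat.toDigits, pvToDigitsCore_mem m (m + 1) [] (by omega)]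
  simp

-- ===== VERDICT (by name: the statement is the Claim_ definition above) =====
theorem not_zero_spec : Claim_equal_not_zero := by
  intro number _ hpre
  unfold Spec_not_zero not_zero not_zero_alt
  obtain ⟨m, rfl⟩ : ∃ m : Nat, number = (m : Int) := ⟨number.toNat, (Int.toNat_of_nonneg hpre).symm⟩
  rw [pvCheckA_eq]
  have hmem : ((0 : Int) ∈ pvLoopA ((m : Int).natAbs + 1) (m : Int) []) ↔ pvHasZero m := by
    rw [Int.natAbs_natCast, pvLoopA_mem m (m + 1) [] (by omega)]
    simp
  have hstr : PySem.Str.isIn "0" (PySem.Int.toStr (m : Int)) = true ↔ pvHasZero m := by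
    rw [PySem.Str.isIn_iff_infix, PySem.Int.toList_toStr]
    have h0 : ("0" : String).toList = ['0'] := rfl
    rw [h0, List.singleton_infix_iff]
    exact pvToChars_mem m
  by_cases hz : pvHasZero m
  · rw [if_pos (hmem.mpr hz), if_pos (hstr.mpr hz)]
  · rw [if_neg (fun h => hz (hmem.mp h)), if_neg (fun h => hz (hstr.mp h))]
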